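-- pv_equiv track=rewrite | github.com/itamar-st/computational_biology_ex3 | crossover.py | crossover_repair
-- ===== SOURCE A (Python) =====
-- ALPHABET = "abcdefghijklmnopqrstuvwxyz"
--
-- def crossover_repair(s):
--     # Find the letters that are missing from the cross string
--     missing_letters = [letter for letter in ALPHABET if letter not in s]
--
--     # Create a mapping of repeated letters to missing letters
--     replace_map = {}
--     repeated_letters = set()
--     for letter in s:
--         if letter in repeated_letters:
--             if letter not in replace_map:
--                 replace_map[letter] = missing_letters.pop(0)
--             s = s.replace(letter, replace_map[letter], 1)
--         else:
--             repeated_letters.add(letter)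
--
--     return s
-- ===== SOURCE B (Python) =====
-- ALPHABET = "abcdefghijklmnopqrstuvwxyz"
--
-- def crossover_repair(s):
--     # One positional pass instead of repeated str.replace scans.
--     missing = [l for l in ALPHABET if l not in s]
--     mapping = {}
--     seen = set()
--     for c in s:
--         if c in seen and c not in mapping:
--             mapping[c] = missing.pop(0)
--         seen.add(c)
--     last = {c: i for i, c in enumerate(s)}
--     return "".join(mapping[c] if c in mapping and i != last[c] else c
--                    for i, c in enumerate(s))
-- ===== Notes on version B (the rewrite author's own statement) =====
-- stated objective: faster
-- what changed: B replaces the repeated str.replace(letter, r, 1) scans over the evolving string by building the duplicate->missing-letter mapping in one pass and then emitting the result in a single positional pass using each character's last index, keeping the last occurrence of each duplicated letter unchanged.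
import Mathlib
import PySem

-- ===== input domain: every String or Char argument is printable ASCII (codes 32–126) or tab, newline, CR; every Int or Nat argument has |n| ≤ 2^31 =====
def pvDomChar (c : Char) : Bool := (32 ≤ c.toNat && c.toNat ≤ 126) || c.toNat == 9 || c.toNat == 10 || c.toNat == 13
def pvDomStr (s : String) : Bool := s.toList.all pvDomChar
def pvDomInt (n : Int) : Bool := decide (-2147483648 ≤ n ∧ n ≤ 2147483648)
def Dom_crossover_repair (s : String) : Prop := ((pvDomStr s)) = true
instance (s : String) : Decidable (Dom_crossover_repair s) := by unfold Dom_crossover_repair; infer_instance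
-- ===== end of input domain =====

-- B replaces A's repeated str.replace scans over the evolving string by one mapping-building
-- pass plus one positional output pass using each character's last index (an asymptotic speedup).

-- ===== PORT A =====
-- ALPHABET = "abcdefghijklmnopqrstuvwxyz"
def pyAlphabet : List Char := "abcdefghijklmnopqrstuvwxyz".toList

-- [letter for letter in ALPHABET if letter not in s]  ('letter not in s' for a single-char
-- letter is exactly list non-membership of the char; both Pythons compute this identically)
def pyMissing (L : List Char) : List Char := pyAlphabet.filter (fun l => !(L.contains l))

-- s.replace(old, new, 1) for single-char old/new: replace the first occurrence (exact there)
def replace1 : List Char → Char → Char → List Char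
  | [], _, _ => []
  | x :: xs, c, r => if x = c then r :: xs else x :: replace1 xs c r

-- A's loop state: (current string s, replace_map, repeated_letters, missing_letters);
-- Option models the possible IndexError of missing_letters.pop(0).
def stepA (st : List Char × PySem.Dict Char Char × PySem.Set Char × List Char) (c : Char) :
    Option (List Char × PySem.Dict Char Char × PySem.Set Char × List Char) :=
  match st with
  | (cur, rmap, rep, missing) =>
    if PySem.Set.contains rep c then
      match (if rmap.contains c then some (rmap, missing)
             else match PySem.List.pop? missing 0 with
                  | some pr => some (rmap.insert c pr.1, pr.2)
                  | none => none) with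
      | none => none                      -- IndexError from pop(0)
      | some (rmap', missing') =>
        match rmap'.get? c with
        | some r => some (replace1 cur c r, rmap', rep, missing')
        | none => none                    -- unreachable (letter was just ensured in replace_map)
    else some (cur, rmap, PySem.Set.add rep c, missing)

-- the for-loop runs over the ORIGINAL s (Python iterates the string object bound at loop entry)
def runA (t : List Char) (o : Option (List Char × PySem.Dict Char Char × PySem.Set Char × List Char)) :
    Option (List Char × PySem.Dict Char Char × PySem.Set Char × List Char) :=
  t.foldl (fun o c => o.bind (fun st => stepA st c)) o

def crossover_repair (s : String) : String :=
  match runA s.toList (some (s.toList, PySem.Dict.empty, PySem.Set.empty, pyMissing s.toList)) with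
  | none => ""                            -- IndexError (excluded by Pre_)
  | some st => String.ofList st.1

-- ===== PORT B =====
-- B's mapping-building loop state: (mapping, seen, missing)
def stepB (st : PySem.Dict Char Char × PySem.Set Char × List Char) (c : Char) :
    Option (PySem.Dict Char Char × PySem.Set Char × List Char) :=
  match st with
  | (mapping, seen, missing) =>
    if PySem.Set.contains seen c && !(mapping.contains c) then
      match PySem.List.pop? missing 0 with
      | some pr => some (mapping.insert c pr.1, PySem.Set.add seen c, pr.2)
      | none => none                      -- IndexError from pop(0)
    else some (mapping, PySem.Set.add seen c, missing)

def runB (t : List Char) (o : Option (PySem.Dict Char Char × PySem.Set Char × List Char)) :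
    Option (PySem.Dict Char Char × PySem.Set Char × List Char) :=
  t.foldl (fun o c => o.bind (fun st => stepB st c)) o

-- last = {c: i for i, c in enumerate(s)}
def lastFold (L : List Char) : PySem.Dict Char Int :=
  (PySem.List.enumerate L).foldl (fun d p => d.insert p.2 p.1) PySem.Dict.empty

-- mapping[c] if c in mapping and i != last[c] else c   (last[c] always exists for c in s;
-- getD's default is never consulted)
def emitB (L : List Char) (m : PySem.Dict Char Char) : List Char :=
  (PySem.List.enumerate L).map (fun p =>
    match m.get? p.2 with
    | some r => if PySem.Dict.getD (lastFold L) p.2 (-1) = p.1 then p.2 else r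
    | none => p.2)

def crossover_repair_alt (s : String) : String :=
  match runB s.toList (some (PySem.Dict.empty, PySem.Set.empty, pyMissing s.toList)) with
  | none => ""                            -- same IndexError point as A (excluded by Pre_)
  | some st => String.ofList (emitB s.toList st.1)

-- ===== PRECONDITION & SPEC =====
-- Pre_ excludes exactly the inputs on which Python A raises IndexError (missing_letters.pop(0)
-- on an empty list): strings with more distinct duplicated characters than alphabet letters
-- absent from the string.  Python B raises at the same point; the Lean ports return "" there,
-- so the equivalence below in fact holds for every s and the proof does not need Pre_.
def Pre_crossover_repair (s : String) : Prop :=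
  ((PySem.List.dedup s.toList).filter (fun c => 2 ≤ s.toList.count c)).length ≤
    (pyAlphabet.filter (fun l => !(s.toList.contains l))).length
instance (s : String) : Decidable (Pre_crossover_repair s) := by
  unfold Pre_crossover_repair; infer_instance

def pvWitness_crossover_repair : String := "hello there"

def Spec_crossover_repair (s : String) (out : String) : Prop := out = crossover_repair_alt s
instance (s : String) (out : String) : Decidable (Spec_crossover_repair s out) := by unfold Spec_crossover_repair; infer_instance

-- ===== CLAIM (what is proved, stated in full; the proofs are below) =====
def Claim_equal_crossover_repair : Prop := ∀ (s : String), Dom_crossover_repair s → Pre_crossover_repair s → Spec_crossover_repair s (crossover_repair s)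

-- ===== LEMMAS AND PROOFS =====

-- projection of A's loop state onto B's (drop the evolving string)
def projA (st : List Char × PySem.Dict Char Char × PySem.Set Char × List Char) :
    PySem.Dict Char Char × PySem.Set Char × List Char :=
  (st.2.1, st.2.2.1, st.2.2.2)

-- one A-step projects to one B-step
lemma stepAB (st : List Char × PySem.Dict Char Char × PySem.Set Char × List Char) (c : Char) :
    (stepA st c).map projA = stepB (projA st) c := by
  obtain ⟨cur, m, rep, mi⟩ := st
  by_cases hrep : c ∈ rep
  · have hrepb : PySem.Set.contains rep c = true := (PySem.Set.contains_iff rep c).mpr hrep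
    have hadd : PySem.Set.add rep c = rep := by simp [PySem.Set.add, hrepb, hrep]
    by_cases hm : m.contains c
    · cases hg : m.get? c with
      | none =>
        rw [PySem.Dict.get?_eq_none_iff_contains] at hg
        exact absurd hm (by simp [hg])
      | some r => simp [stepA, stepB, projA, hrepb, hrep, hm, hg, hadd]
    · cases hp : PySem.List.pop? mi 0 with
      | none => simp [stepA, stepB, projA, hrepb, hrep, hm, hp]
      | some pr =>
        simp [stepA, stepB, projA, hrepb, hrep, hm, hp, hadd, PySem.Dict.get?_insert_self]
  · have hrepb : PySem.Set.contains rep c = false := by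
      cases hcb : PySem.Set.contains rep c with
      | false => rfl
      | true => exact absurd ((PySem.Set.contains_iff rep c).mp hcb) hrep
    simp [stepA, stepB, projA, hrepb, hrep]

lemma runAB (t : List Char) (o : Option (List Char × PySem.Dict Char Char × PySem.Set Char × List Char)) :
    (runA t o).map projA = runB t (o.map projA) := by
  induction t generalizing o with
  | nil => rfl
  | cons c t ih =>
    have hstep : (o.bind (fun st => stepA st c)).map projA =
        (o.map projA).bind (fun st => stepB st c) := by
      cases o with
      | none => rfl
      | some st => simpa using stepAB st c
    simpa [runA, runB, List.foldl] using (hstep ▸ ih (o.bind (fun st => stepA st c)))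

-- spec-side description of A's evolving string: the first (thr c) occurrences of each char c
-- are replaced by its mapping value
def repl (m : PySem.Dict Char Char) : (Char → Nat) → List Char → List Char
  | _, [] => []
  | thr, x :: xs =>
    if thr x = 0 then x :: repl m thr xs
    else PySem.Dict.getD m x x :: repl m (fun y => if y = x then thr x - 1 else thr y) xs

lemma repl_zero (m : PySem.Dict Char Char) (thr : Char → Nat) (L : List Char)
    (h : ∀ c, thr c = 0) : repl m thr L = L := by
  induction L with
  | nil => rfl
  | cons x xs ih => simp [repl, h x, ih]

lemma repl_insert_of_thr_zero (m : PySem.Dict Char Char) (c v : Char) (L : List Char) :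
    ∀ (thr : Char → Nat), thr c = 0 → repl (m.insert c v) thr L = repl m thr L := by
  induction L with
  | nil => intro thr _; rfl
  | cons x xs ih =>
    intro thr hc
    by_cases hx : thr x = 0
    · simp [repl, hx, ih thr hc]
    · have hxc : x ≠ c := by intro h; rw [h] at hx; exact hx hc
      have hget : PySem.Dict.getD (m.insert c v) x x = PySem.Dict.getD m x x := by
        simp [PySem.Dict.getD_insert, hxc]
      have h2 : (fun y => if y = x then thr x - 1 else thr y) c = 0 := by
        simp only []; rw [if_neg (Ne.symm hxc)]; exact hc
      simp [repl, hx, hget, ih (fun y => if y = x then thr x - 1 else thr y) h2]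

lemma length_repl (m : PySem.Dict Char Char) : ∀ (thr : Char → Nat) (L : List Char),
    (repl m thr L).length = L.length := by
  intro thr L
  induction L generalizing thr with
  | nil => rfl
  | cons x xs ih => by_cases h : thr x = 0 <;> simp [repl, h, ih]

lemma getElem?_repl (m : PySem.Dict Char Char) :
    ∀ (L : List Char) (thr : Char → Nat) (j : Nat) (h : j < L.length),
    (repl m thr L)[j]? =
      some (if (L.take j).count (L[j]'h) < thr (L[j]'h) then
        PySem.Dict.getD m (L[j]'h) (L[j]'h) else L[j]'h) := by
  intro L
  induction L with
  | nil => intro thr j h; simp at h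
  | cons x xs ih =>
    intro thr j h
    cases j with
    | zero =>
      by_cases hx : thr x = 0
      · simp [repl, hx]
      · simp [repl, hx, Nat.pos_of_ne_zero hx]
    | succ j =>
      have hj : j < xs.length := by simpa using h
      have hget : (x :: xs)[j + 1]'h = xs[j]'hj := by simp
      by_cases hxc : x = xs[j]'hj
      · have hcnt : ((x :: xs).take (j + 1)).count ((x :: xs)[j + 1]'h) =
            (xs.take j).count (xs[j]'hj) + 1 := by
          simp [hget, List.take_succ_cons, List.count_cons, hxc]
        by_cases hx : thr x = 0
        · have h0 : thr (xs[j]'hj) = 0 := hxc ▸ hx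
          have hL : (repl m thr (x :: xs))[j + 1]? = (repl m thr xs)[j]? := by
            simp [repl, hx]
          rw [hL, ih thr j hj, hcnt, hget, h0]
          simp
        · have hL : (repl m thr (x :: xs))[j + 1]? =
              (repl m (fun y => if y = x then thr x - 1 else thr y) xs)[j]? := by
            simp [repl, hx]
          rw [hL, ih _ j hj, hcnt, hget]
          have hxj : xs[j]'hj = x := hxc.symm
          rw [if_pos hxj]
          have hthx : thr (xs[j]'hj) = thr x := by rw [hxj]
          rw [hthx]
          congr 1
          exact if_congr (by omega) rfl rfl
      · have hcnt : ((x :: xs).take (j + 1)).count ((x :: xs)[j + 1]'h) =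
            (xs.take j).count (xs[j]'hj) := by
          simp [hget, List.take_succ_cons, List.count_cons, hxc]
        by_cases hx : thr x = 0
        · have hL : (repl m thr (x :: xs))[j + 1]? = (repl m thr xs)[j]? := by
            simp [repl, hx]
          rw [hL, ih thr j hj, hcnt, hget]
        · have hL : (repl m thr (x :: xs))[j + 1]? =
              (repl m (fun y => if y = x then thr x - 1 else thr y) xs)[j]? := by
            simp [repl, hx]
          rw [hL, ih _ j hj, hcnt, hget]
          have hcond : (if xs[j]'hj = x then thr x - 1 else thr (xs[j]'hj)) = thr (xs[j]'hj) :=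
            if_neg (fun hh => hxc hh.symm)
          rw [hcond]

lemma repl_cons_zero (m : PySem.Dict Char Char) (thr : Char → Nat) (x : Char) (xs : List Char)
    (h : thr x = 0) : repl m thr (x :: xs) = x :: repl m thr xs := by
  simp [repl, h]

lemma repl_cons_pos (m : PySem.Dict Char Char) (thr : Char → Nat) (x : Char) (xs : List Char)
    (h : ¬ thr x = 0) : repl m thr (x :: xs) =
      PySem.Dict.getD m x x :: repl m (fun y => if y = x then thr x - 1 else thr y) xs := by
  simp [repl, h]

lemma repl_congr (m : PySem.Dict Char Char) (thr thr' : Char → Nat) (L : List Char)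
    (h : ∀ y, thr y = thr' y) : repl m thr L = repl m thr' L := by
  rw [funext h]

lemma replace1_repl (m : PySem.Dict Char Char) :
    ∀ (L : List Char) (thr : Char → Nat) (c r : Char),
    m.get? c = some r → (∀ k v, m.get? k = some v → v ∉ L) → thr c < L.count c →
    replace1 (repl m thr L) c r = repl m (fun y => if y = c then thr c + 1 else thr y) L := by
  intro L
  induction L with
  | nil => intro thr c r _ _ hcnt; simp at hcnt
  | cons x xs ih =>
    intro thr c r hg hvals hcnt
    have hvals' : ∀ k v, m.get? k = some v → v ∉ xs :=
      fun k v hkv hm => hvals k v hkv (List.mem_cons_of_mem _ hm)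
    have hgd : PySem.Dict.getD m c c = r := by
      rw [PySem.Dict.getD_eq_get?_getD, hg]; rfl
    have hrL : r ∉ x :: xs := hvals c r hg
    by_cases hxc : x = c
    · subst hxc
      have hrx : r ≠ x := fun h => hrL (h ▸ List.mem_cons_self)
      by_cases hx : thr x = 0
      · have ha : ¬ (fun y => if y = x then thr x + 1 else thr y) x = 0 := by
          show ¬ (if x = x then thr x + 1 else thr x) = 0
          rw [if_pos rfl]
          omega
        rw [repl_cons_zero m thr x xs hx, repl_cons_pos m _ x xs ha]
        have hhead : replace1 (x :: repl m thr xs) x r = r :: repl m thr xs := by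
          simp [replace1]
        rw [hhead, hgd]
        congr 1
        apply repl_congr
        intro y
        by_cases hy : y = x <;> simp [hy, hx]
      · have ha : ¬ (fun y => if y = x then thr x + 1 else thr y) x = 0 := by
          show ¬ (if x = x then thr x + 1 else thr x) = 0
          rw [if_pos rfl]
          omega
        have hcnt' : (fun y => if y = x then thr x - 1 else thr y) x < xs.count x := by
          show (if x = x then thr x - 1 else thr x) < xs.count x
          rw [if_pos rfl]
          have hxx : (x :: xs).count x = xs.count x + 1 := by simp
          omega
        rw [repl_cons_pos m thr x xs hx, hgd]
        have hhead : replace1 (r :: repl m (fun y => if y = x then thr x - 1 else thr y) xs) x r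
            = r :: replace1 (repl m (fun y => if y = x then thr x - 1 else thr y) xs) x r := by
          simp [replace1, hrx]
        rw [hhead, ih (fun y => if y = x then thr x - 1 else thr y) x r hg hvals' hcnt',
            repl_cons_pos m _ x xs ha, hgd]
        congr 1
        apply repl_congr
        intro y
        by_cases hy : y = x <;> simp [hy] <;> omega
    · have hcount : (x :: xs).count c = xs.count c := by
        simp [List.count_cons, hxc]
      have hcxs : c ∈ xs := by
        have h0 : 0 < xs.count c := by omega
        exact List.count_pos_iff.mp h0
      by_cases hx : thr x = 0
      · have hb : (fun y => if y = c then thr c + 1 else thr y) x = 0 := by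
          show (if x = c then thr c + 1 else thr x) = 0
          rw [if_neg hxc]
          exact hx
        rw [repl_cons_zero m thr x xs hx, repl_cons_zero m _ x xs hb]
        have hhead : replace1 (x :: repl m thr xs) c r = x :: replace1 (repl m thr xs) c r := by
          simp [replace1, hxc]
        rw [hhead]
        congr 1
        exact ih thr c r hg hvals' (by omega)
      · rw [repl_cons_pos m thr x xs hx]
        have hvne : ¬ PySem.Dict.getD m x x = c := by
          cases hgx : m.get? x with
          | none =>
            rw [PySem.Dict.getD_eq_get?_getD, hgx]
            exact hxc
          | some v =>
            rw [PySem.Dict.getD_eq_get?_getD, hgx]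
            intro hh
            have hvc : v = c := by simpa using hh
            exact (hvals x v hgx) (by rw [hvc]; exact List.mem_cons_of_mem _ hcxs)
        have hhead : replace1 (PySem.Dict.getD m x x :: repl m (fun y => if y = x then thr x - 1 else thr y) xs) c r
            = PySem.Dict.getD m x x :: replace1 (repl m (fun y => if y = x then thr x - 1 else thr y) xs) c r := by
          simp [replace1, hvne]
        have hcnt2 : (fun y => if y = x then thr x - 1 else thr y) c < xs.count c := by
          show (if c = x then thr x - 1 else thr c) < xs.count c
          rw [if_neg (Ne.symm hxc)]
          omega
        have hb' : ¬ (fun y => if y = c then thr c + 1 else thr y) x = 0 := by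
          show ¬ (if x = c then thr c + 1 else thr x) = 0
          rw [if_neg hxc]
          exact hx
        rw [hhead, ih (fun y => if y = x then thr x - 1 else thr y) c r hg hvals' hcnt2,
            repl_cons_pos m _ x xs hb']
        congr 1
        apply repl_congr
        intro y
        by_cases hyc : y = c
        · by_cases hyx : y = x
          · exact absurd (hyx ▸ hyc) hxc
          · simp [hyc, Ne.symm hxc, hxc]
        · by_cases hyx : y = x
          · simp [hyc, hyx, hxc]
          · simp [hyc, hyx]

-- threshold induced by a processed prefix p
def thrOf (p : List Char) : Char → Nat := fun c => p.count c - 1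

lemma runA_none (t : List Char) : runA t none = none := by
  induction t with
  | nil => rfl
  | cons c t ih => simpa [runA, List.foldl] using ih

-- main invariant for A's loop
lemma mainA : ∀ (t p : List Char) (m : PySem.Dict Char Char) (mi : List Char)
    (fin : List Char × PySem.Dict Char Char × PySem.Set Char × List Char),
    runA t (some (repl m (thrOf p) (p ++ t), m, PySem.Set.ofList p, mi)) = some fin →
    (∀ k v, m.get? k = some v → v ∉ (p ++ t)) →
    (∀ c, m.contains c = decide (2 ≤ p.count c)) →
    (∀ x ∈ mi, x ∉ (p ++ t)) →
    ∃ m' mi', fin = (repl m' (thrOf (p ++ t)) (p ++ t), m', PySem.Set.ofList (p ++ t), mi') ∧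
      (∀ c, m'.contains c = decide (2 ≤ (p ++ t).count c)) := by
  intro t
  induction t with
  | nil =>
    intro p m mi fin hrun hvals hcont hmi
    simp only [runA, List.foldl_nil] at hrun
    refine ⟨m, mi, ?_, ?_⟩
    · rw [← Option.some.inj hrun]
      simp
    · intro d
      simpa using hcont d
  | cons c t ih =>
    intro p m mi fin hrun hvals hcont hmi
    rw [show p ++ c :: t = (p ++ [c]) ++ t from by simp] at hrun hvals hmi ⊢
    simp only [runA, List.foldl_cons, Option.bind] at hrun
    by_cases hcp : c ∈ p
    · have hrepb : PySem.Set.contains (PySem.Set.ofList p) c = true :=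
        (PySem.Set.contains_iff _ c).mpr ((PySem.Set.mem_ofList p c).mpr hcp)
      have hofl : PySem.Set.ofList (p ++ [c]) = PySem.Set.ofList p := by
        rw [PySem.Set.ofList_eq_foldl, List.foldl_append, ← PySem.Set.ofList_eq_foldl]
        simp [PySem.Set.add, hrepb, hcp]
      have hpc1 : 0 < p.count c := List.count_pos_iff.mpr hcp
      have hca : (p ++ [c]).count c = p.count c + 1 := by simp [List.count_append, List.count_cons]
      by_cases hm : m.contains c = true
      · have hc2 : 2 ≤ p.count c := by
          have hcc := hcont c
          rw [hm] at hcc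
          exact of_decide_eq_true hcc.symm
        obtain ⟨r, hg⟩ : ∃ r, m.get? c = some r := by
          cases hgc : m.get? c with
          | none =>
            rw [PySem.Dict.get?_eq_none_iff_contains] at hgc
            rw [hgc] at hm
            exact Bool.noConfusion hm
          | some r => exact ⟨r, rfl⟩
        have hstep : stepA (repl m (thrOf p) ((p ++ [c]) ++ t), m, PySem.Set.ofList p, mi) c
            = some (replace1 (repl m (thrOf p) ((p ++ [c]) ++ t)) c r, m, PySem.Set.ofList p, mi) := by
          simp [stepA, hrepb, hcp, hm, hg]
        rw [hstep] at hrun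
        have hcntL : thrOf p c < ((p ++ [c]) ++ t).count c := by
          have h1 : ((p ++ [c]) ++ t).count c = p.count c + 1 + t.count c := by
            simp [List.count_append, List.count_cons]
            omega
          simp only [thrOf, h1]
          omega
        have hrw : replace1 (repl m (thrOf p) ((p ++ [c]) ++ t)) c r
            = repl m (thrOf (p ++ [c])) ((p ++ [c]) ++ t) := by
          rw [replace1_repl m ((p ++ [c]) ++ t) (thrOf p) c r hg hvals hcntL]
          apply repl_congr
          intro y
          by_cases hy : y = c
          · rw [if_pos hy, hy]
            simp only [thrOf, hca]
            omega
          · have h1 : (p ++ [c]).count y = p.count y := by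
              simp [List.count_append, List.count_cons, hy]
              exact fun hh => hy hh.symm
            simp only [if_neg hy, thrOf, h1]
        rw [hrw, ← hofl] at hrun
        have hcont' : ∀ d, m.contains d = decide (2 ≤ (p ++ [c]).count d) := by
          intro d
          by_cases hdc : d = c
          · subst hdc
            rw [hm, hca]
            symm
            rw [decide_eq_true_iff]
            omega
          · have h1 : (p ++ [c]).count d = p.count d := by
              simp [List.count_append, List.count_cons, hdc]
              exact fun hh => hdc hh.symm
            rw [h1]
            exact hcont d
        exact ih (p ++ [c]) m mi fin (by simpa [runA, Option.bind] using hrun) hvals hcont' hmi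
      · have hmf : m.contains c = false := by
          cases hcb : m.contains c with
          | false => rfl
          | true => exact absurd hcb hm
        have hc1 : p.count c = 1 := by
          have hcc := hcont c
          rw [hmf] at hcc
          have := of_decide_eq_false hcc.symm
          omega
        cases mi with
        | nil =>
          have hstep : stepA (repl m (thrOf p) ((p ++ [c]) ++ t), m, PySem.Set.ofList p, ([] : List Char)) c = none := by
            simp [stepA, hrepb, hcp, hmf, PySem.List.pop?]
          rw [hstep] at hrun
          have hnone := runA_none t
          simp only [runA, Option.bind] at hnone
          rw [hnone] at hrun
          simp at hrun
        | cons r mi' =>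
          have hgins := PySem.Dict.get?_insert_self m c r
          have hstep : stepA (repl m (thrOf p) ((p ++ [c]) ++ t), m, PySem.Set.ofList p, r :: mi') c
              = some (replace1 (repl m (thrOf p) ((p ++ [c]) ++ t)) c r, m.insert c r, PySem.Set.ofList p, mi') := by
            simp [stepA, hrepb, hcp, hmf, PySem.List.pop?_zero_cons, hgins]
          rw [hstep] at hrun
          have hzero : thrOf p c = 0 := by simp [thrOf, hc1]
          have hvalsI : ∀ k v, (m.insert c r).get? k = some v → v ∉ (p ++ [c]) ++ t := by
            intro k v hkv
            rw [PySem.Dict.get?_insert] at hkv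
            by_cases hkc : k = c
            · rw [if_pos hkc] at hkv
              rw [← Option.some.inj hkv]
              exact hmi r List.mem_cons_self
            · rw [if_neg hkc] at hkv
              exact hvals k v hkv
          have hcntL : thrOf p c < ((p ++ [c]) ++ t).count c := by
            have h1 : ((p ++ [c]) ++ t).count c = p.count c + 1 + t.count c := by
              simp [List.count_append, List.count_cons]
              omega
            simp only [thrOf, h1]
            omega
          have hrw : replace1 (repl m (thrOf p) ((p ++ [c]) ++ t)) c r
              = repl (m.insert c r) (thrOf (p ++ [c])) ((p ++ [c]) ++ t) := by
            rw [← repl_insert_of_thr_zero m c r ((p ++ [c]) ++ t) (thrOf p) hzero]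
            rw [replace1_repl (m.insert c r) ((p ++ [c]) ++ t) (thrOf p) c r hgins hvalsI hcntL]
            apply repl_congr
            intro y
            by_cases hy : y = c
            · rw [if_pos hy, hy]
              simp only [thrOf, hca]
              omega
            · have h1 : (p ++ [c]).count y = p.count y := by
                simp [List.count_append, List.count_cons, hy]
                exact fun hh => hy hh.symm
              simp only [if_neg hy, thrOf, h1]
          rw [hrw, ← hofl] at hrun
          have hcont' : ∀ d, (m.insert c r).contains d = decide (2 ≤ (p ++ [c]).count d) := by
            intro d
            rw [PySem.Dict.contains_insert]
            by_cases hdc : d = c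
            · rw [hdc]
              have h1 : (p ++ [c]).count c = 2 := by rw [hca, hc1]
              rw [h1]
              simp
            · have h1 : (p ++ [c]).count d = p.count d := by
                simp [List.count_append, List.count_cons, hdc]
                exact fun hh => hdc hh.symm
              have h2 : (d == c) = false := by simp [hdc]
              rw [h1, h2, Bool.false_or]
              exact hcont d
          have hmi' : ∀ x ∈ mi', x ∉ (p ++ [c]) ++ t :=
            fun x hx => hmi x (List.mem_cons_of_mem _ hx)
          exact ih (p ++ [c]) (m.insert c r) mi' fin (by simpa [runA, Option.bind] using hrun) hvalsI hcont' hmi'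
    · have hrepb : PySem.Set.contains (PySem.Set.ofList p) c = false := by
        cases hcb : PySem.Set.contains (PySem.Set.ofList p) c with
        | false => rfl
        | true => exact absurd ((PySem.Set.mem_ofList p c).mp ((PySem.Set.contains_iff _ c).mp hcb)) hcp
      have hpc0 : p.count c = 0 := List.count_eq_zero.mpr hcp
      have hstep : stepA (repl m (thrOf p) ((p ++ [c]) ++ t), m, PySem.Set.ofList p, mi) c
          = some (repl m (thrOf p) ((p ++ [c]) ++ t), m, PySem.Set.add (PySem.Set.ofList p) c, mi) := by
        simp [stepA, hrepb, hcp]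
      rw [hstep] at hrun
      have hofl : PySem.Set.ofList (p ++ [c]) = PySem.Set.add (PySem.Set.ofList p) c := by
        rw [PySem.Set.ofList_eq_foldl, List.foldl_append, ← PySem.Set.ofList_eq_foldl]
        simp
      have hca : (p ++ [c]).count c = 1 := by simp [List.count_append, List.count_cons, hpc0]
      have hthr : repl m (thrOf p) ((p ++ [c]) ++ t) = repl m (thrOf (p ++ [c])) ((p ++ [c]) ++ t) := by
        apply repl_congr
        intro y
        by_cases hy : y = c
        · rw [hy]
          simp only [thrOf, hca, hpc0]
        · have h1 : (p ++ [c]).count y = p.count y := by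
            simp [List.count_append, List.count_cons, hy]
            exact fun hh => hy hh.symm
          simp only [thrOf, h1]
      have hcont' : ∀ d, m.contains d = decide (2 ≤ (p ++ [c]).count d) := by
        intro d
        by_cases hdc : d = c
        · rw [hdc, hca, hcont c, hpc0]
          decide
        · have h1 : (p ++ [c]).count d = p.count d := by
            simp [List.count_append, List.count_cons, hdc]
            exact fun hh => hdc hh.symm
          rw [h1]
          exact hcont d
      rw [hthr, ← hofl] at hrun
      exact ih (p ++ [c]) m mi fin (by simpa [runA, Option.bind] using hrun) hvals hcont' hmi

-- last-index helper (proof side) and its link to B's lastFold dict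
def lastIdx : List Char → Char → Option Nat
  | [], _ => none
  | x :: xs, c =>
    match lastIdx xs c with
    | some k => some (k + 1)
    | none => if x = c then some 0 else none

lemma lastIdx_eq_none_iff (c : Char) : ∀ (L : List Char), lastIdx L c = none ↔ c ∉ L := by
  intro L
  induction L with
  | nil => simp [lastIdx]
  | cons x xs ih =>
    cases hl : lastIdx xs c with
    | some k =>
      have hmem : c ∈ xs := by
        by_contra hc
        rw [← ih] at hc
        rw [hc] at hl
        simp at hl
      simp [lastIdx, hl, hmem]
    | none =>
      have hnx : c ∉ xs := ih.mp hl
      by_cases hxc : x = c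
      · simp [lastIdx, hl, hxc, hnx, eq_comm]
      · simp [lastIdx, hl, hxc, hnx]
        exact fun hh => hxc hh.symm

lemma lastIdx_eq_some_iff (c : Char) :
    ∀ (L : List Char) (j : Nat), lastIdx L c = some j ↔
      (L[j]? = some c ∧ (L.drop (j + 1)).count c = 0) := by
  intro L
  induction L with
  | nil => intro j; simp [lastIdx]
  | cons x xs ih =>
    intro j
    cases hl : lastIdx xs c with
    | some k =>
      have hmem : c ∈ xs := by
        by_contra hc
        rw [← lastIdx_eq_none_iff c xs] at hc
        rw [hc] at hl
        simp at hl
      cases j with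
      | zero =>
        have hcnt : xs.count c ≠ 0 := by
          simp [Ne, List.count_eq_zero, hmem]
        simp [lastIdx, hl, hcnt]
      | succ j =>
        have hiff := ih j
        rw [hl] at hiff
        simp only [lastIdx, hl]
        constructor
        · intro h
          have hkj : k = j := by
            have h2 := Option.some.inj h
            omega
          subst hkj
          have hx2 := hiff.mp rfl
          simpa using hx2
        · intro h2
          have h3 : xs[j]? = some c ∧ (xs.drop (j + 1)).count c = 0 := by simpa using h2
          have h4 : some k = some j := hiff.mpr h3
          simp [Option.some.inj h4]
    | none =>
      have hnx : c ∉ xs := (lastIdx_eq_none_iff c xs).mp hl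
      have hcnt : xs.count c = 0 := List.count_eq_zero.mpr hnx
      cases j with
      | zero =>
        by_cases hxc : x = c
        · simp [lastIdx, hl, hxc, hcnt, eq_comm]
        · simp [lastIdx, hl, hxc, hcnt]
      | succ j =>
        have hno : xs[j]? ≠ some c := by
          intro h
          exact hnx (List.mem_of_getElem? h)
        by_cases hxc : x = c <;> simp [lastIdx, hl, hxc, hno]

lemma lastFold_get? :
    ∀ (L : List Char) (s : Int) (d : PySem.Dict Char Int) (c : Char),
    ((PySem.List.enumerate L s).foldl (fun d p => d.insert p.2 p.1) d).get? c =
      match lastIdx L c with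
      | some k => some (s + (k : Int))
      | none => d.get? c := by
  intro L
  induction L with
  | nil => intro s d c; simp [lastIdx, PySem.List.enumerate]
  | cons x xs ih =>
    intro s d c
    rw [PySem.List.enumerate_cons]
    simp only [List.foldl_cons]
    rw [ih (s + 1) (d.insert x s) c]
    cases hl : lastIdx xs c with
    | some k =>
      simp only [lastIdx, hl]
      congr 1
      push_cast
      ring
    | none =>
      simp only [lastIdx, hl]
      rw [PySem.Dict.get?_insert]
      by_cases hxc : x = c
      · simp [hxc, eq_comm]
      · simp [hxc]
        intro hh
        exact absurd hh (Ne.symm hxc)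

-- B's output pass equals the spec-side description of A's final string
lemma emitB_eq_repl (L : List Char) (m : PySem.Dict Char Char)
    (hcont : ∀ c, m.contains c = decide (2 ≤ L.count c)) :
    emitB L m = repl m (thrOf L) L := by
  apply List.ext_getElem?
  intro j
  by_cases hj : j < L.length
  · have hLj : L[j]? = some (L[j]'hj) := List.getElem?_eq_getElem hj
    have hrepl := getElem?_repl m L (thrOf L) j hj
    have hemit : (emitB L m)[j]? = some (
        match m.get? (L[j]'hj) with
        | some r =>
          if PySem.Dict.getD (lastFold L) (L[j]'hj) (-1) = ((0 : Int) + (j : Int)) then (L[j]'hj) else r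
        | none => (L[j]'hj)) := by
      simp [emitB, PySem.List.getElem?_enumerate, hLj]
    rw [hemit, hrepl]
    have h0 : L.take (j + 1) = L.take j ++ [L[j]'hj] := by
      rw [List.take_succ, hLj]
      rfl
    have hts : (L.take (j + 1)).count (L[j]'hj) = (L.take j).count (L[j]'hj) + 1 := by
      rw [h0, List.count_append]
      simp
    have htdg : ∀ a : Char, (L.take (j + 1)).count a + (L.drop (j + 1)).count a = L.count a := by
      intro a
      conv_rhs => rw [← List.take_append_drop (j + 1) L]
      rw [List.count_append]
    have htd := htdg (L[j]'hj)
    have htle : (L.take (j + 1)).count (L[j]'hj) ≤ L.count (L[j]'hj) := by omega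
    cases hg : m.get? (L[j]'hj) with
    | none =>
      have hcf : m.contains (L[j]'hj) = false := (PySem.Dict.get?_eq_none_iff_contains m _).mp hg
      have hle : L.count (L[j]'hj) ≤ 1 := by
        have hcc := hcont (L[j]'hj)
        rw [hcf] at hcc
        have := of_decide_eq_false hcc.symm
        omega
      have hz : ¬ (L.take j).count (L[j]'hj) < thrOf L (L[j]'hj) := by
        simp only [thrOf]
        omega
      simp [hg, hz]
    | some r =>
      have hct : m.contains (L[j]'hj) = true := by
        cases hcb : m.contains (L[j]'hj) with
        | true => rfl
        | false =>
          rw [← PySem.Dict.get?_eq_none_iff_contains] at hcb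
          rw [hcb] at hg
          simp at hg
      have h2 : 2 ≤ L.count (L[j]'hj) := by
        have hcc := hcont (L[j]'hj)
        rw [hct] at hcc
        exact of_decide_eq_true hcc.symm
      have hmem : (L[j]'hj) ∈ L := List.getElem_mem hj
      obtain ⟨k, hk⟩ : ∃ k, lastIdx L (L[j]'hj) = some k := by
        cases hlast : lastIdx L (L[j]'hj) with
        | none => exact absurd ((lastIdx_eq_none_iff _ L).mp hlast) (by simpa using hmem)
        | some k => exact ⟨k, rfl⟩
      have hgetlast : (lastFold L).getD (L[j]'hj) (-1) = ((0 : Int) + (k : Int)) := by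
        rw [PySem.Dict.getD_eq_get?_getD]
        have hget := lastFold_get? L 0 PySem.Dict.empty (L[j]'hj)
        rw [hk] at hget
        rw [show (lastFold L).get? (L[j]'hj) = some ((0 : Int) + (k : Int)) from hget]
        rfl
      have hkspec := (lastIdx_eq_some_iff (L[j]'hj) L k).mp hk
      have hgd : PySem.Dict.getD m (L[j]'hj) (L[j]'hj) = r := by
        rw [PySem.Dict.getD_eq_get?_getD, hg]
        rfl
      by_cases hkj : k = j
      · subst hkj
        have hdrop : (L.drop (k + 1)).count (L[k]'hj) = 0 := hkspec.2
        have hnot : ¬ (L.take k).count (L[k]'hj) < thrOf L (L[k]'hj) := by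
          simp only [thrOf]
          omega
        simp [hg, hgetlast, hnot]
      · have hdrop : (L.drop (j + 1)).count (L[j]'hj) ≠ 0 := by
          intro h0
          have hsome := (lastIdx_eq_some_iff (L[j]'hj) L j).mpr ⟨hLj, h0⟩
          rw [hk] at hsome
          exact hkj (Option.some.inj hsome)
        have hlt : (L.take j).count (L[j]'hj) < thrOf L (L[j]'hj) := by
          simp only [thrOf]
          omega
        have hne : ¬ ((0 : Int) + (k : Int) = (0 : Int) + (j : Int)) := by
          intro hE
          exact hkj (by omega)
        simp [hg, hgetlast, hlt, hne, hgd]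
        intro hE
        exact absurd hE hkj
  · have h1 : (emitB L m).length = L.length := by simp [emitB, PySem.List.length_enumerate]
    have h2 : (repl m (thrOf L) L).length = L.length := length_repl m (thrOf L) L
    rw [List.getElem?_eq_none, List.getElem?_eq_none] <;> omega

-- the two ports agree on every input
lemma ports_eq (s : String) : crossover_repair s = crossover_repair_alt s := by
  have hmi0 : ∀ x ∈ pyMissing s.toList, x ∉ s.toList := by
    intro x hx
    simp only [pyMissing, List.mem_filter, Bool.not_eq_eq_eq_not, Bool.not_true] at hx
    simpa using hx.2
  have hinit : repl PySem.Dict.empty (thrOf []) s.toList = s.toList :=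
    repl_zero _ _ _ (fun c => by simp [thrOf])
  have hAB := runAB s.toList (some (s.toList, PySem.Dict.empty, PySem.Set.empty, pyMissing s.toList))
  unfold crossover_repair crossover_repair_alt
  cases hA : runA s.toList (some (s.toList, PySem.Dict.empty, PySem.Set.empty, pyMissing s.toList)) with
  | none =>
    rw [hA] at hAB
    simp only [Option.map_none, Option.map_some, projA] at hAB
    rw [← hAB]
  | some fin =>
    rw [hA] at hAB
    simp only [Option.map_some, projA] at hAB
    obtain ⟨m', mi', hfin, hcont'⟩ := mainA s.toList [] PySem.Dict.empty (pyMissing s.toList) fin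
      (by simpa [hinit] using hA)
      (by intro k v hkv; simp at hkv)
      (by intro c; simp [PySem.Dict.contains_empty])
      (by simpa using hmi0)
    simp only [List.nil_append] at hfin hcont'
    rw [hfin] at hAB ⊢
    rw [← hAB]
    simp only []
    rw [emitB_eq_repl s.toList m' hcont']

-- ===== VERDICT (by name: the statement is the Claim_ definition above) =====
theorem crossover_repair_spec : Claim_equal_crossover_repair := by
  intro s _ _
  unfold Spec_crossover_repair
  exact ports_eq s
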